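-- pv_equiv track=rewrite | github.com/anmaricdev/Thesis-Bachelor | Bin Packing Algorithms/BinPackingAlgorithms.py | bin_packing_worst_fit_var_capa
-- ===== SOURCE A (Python) =====
-- def bin_packing_worst_fit_var_capa(bin_capacities, elements):
--     is_packing_possible = True
--     max_capacity = max(bin_capacities)
--     m = len(bin_capacities)
--     n = len(elements)
--     bins = [[] for _ in range(m)]
--     bins_in_use = [i for i in range(m)]
--     bins_packed_after_failure = [[] for _ in range(m)]
--     for elem in elements:
--         # search for bin in use where it fits worst
--         worst_bin = -1
--         worst_remaining_capacity = -1
--         for i in range(len(bins_in_use)):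
--             remaining_capacity = bin_capacities[bins_in_use[i]
--                                                 ] - (sum(bins[bins_in_use[i]]) + elem)
--             if remaining_capacity >= 0 and remaining_capacity > worst_remaining_capacity:
--                 worst_bin = bins_in_use[i]
--                 worst_remaining_capacity = remaining_capacity
--         # found?
--         if worst_bin != -1:
--             bins[worst_bin] += [elem]
--             if not is_packing_possible:
--                 bins_packed_after_failure[worst_bin] += [elem]
--             # is this bin full now?
--             if worst_remaining_capacity == 0:
--                 bins_in_use.remove(worst_bin)
--         else:
--             is_packing_possible = False
--     return is_packing_possible, bins, bins_packed_after_failure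
-- ===== SOURCE B (Python) =====
-- def _insort(lst, item):
--     # insert (free, idx) keeping lst ordered by free space descending, index ascending
--     f, i = item
--     k = 0
--     while k < len(lst) and (lst[k][0] > f or (lst[k][0] == f and lst[k][1] < i)):
--         k += 1
--     lst.insert(k, item)
--
--
-- def bin_packing_worst_fit_var_capa(bin_capacities, elements):
--     # Priority queue of open bins as a list kept sorted by (free space desc, index asc):
--     # the worst-fit target is always the head, so no per-element scan over all bins.
--     bins = [[] for _ in bin_capacities]
--     bins_packed_after_failure = [[] for _ in bin_capacities]
--     open_bins = []
--     for i, c in enumerate(bin_capacities):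
--         _insort(open_bins, (c, i))
--     is_packing_possible = True
--     for elem in elements:
--         if not open_bins or open_bins[0][0] < elem:
--             is_packing_possible = False
--             continue
--         free, idx = open_bins.pop(0)
--         bins[idx].append(elem)
--         if not is_packing_possible:
--             bins_packed_after_failure[idx].append(elem)
--         rem = free - elem
--         if rem > 0:
--             _insort(open_bins, (rem, idx))
--     return is_packing_possible, bins, bins_packed_after_failure
-- ===== Notes on version B (the rewrite author's own statement) =====
-- stated objective: faster
-- what changed: B keeps the open bins in a list sorted by (free space desc, index asc) built and maintained by sorted insertion, so the worst-fit bin is always the head, picked in O(1), instead of A's per-element scan over all open bins that re-sums each bin's contents.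
-- outside the precondition, e.g. on bin_packing_worst_fit_var_capa([], [1]): A raises ValueError, B returns (False, [], [])
import Mathlib
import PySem

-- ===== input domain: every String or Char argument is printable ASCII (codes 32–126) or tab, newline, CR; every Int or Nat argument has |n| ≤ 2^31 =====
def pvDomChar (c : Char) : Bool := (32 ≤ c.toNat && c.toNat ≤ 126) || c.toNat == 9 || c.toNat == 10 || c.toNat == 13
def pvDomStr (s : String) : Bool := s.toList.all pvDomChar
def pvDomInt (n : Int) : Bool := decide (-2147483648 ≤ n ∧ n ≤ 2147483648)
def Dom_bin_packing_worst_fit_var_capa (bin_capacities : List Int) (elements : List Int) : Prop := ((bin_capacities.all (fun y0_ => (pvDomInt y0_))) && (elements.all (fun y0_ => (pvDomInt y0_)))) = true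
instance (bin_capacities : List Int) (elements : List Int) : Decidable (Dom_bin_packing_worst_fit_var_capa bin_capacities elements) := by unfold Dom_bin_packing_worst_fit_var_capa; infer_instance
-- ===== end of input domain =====

-- B keeps the open bins in a list sorted by (free space desc, index asc), so the
-- worst-fit bin is always the head: no per-element scan or re-summing (objective: faster).

-- ===== PORT A =====
-- body of the inner scan: one candidate bin b against the current (worst_bin, worst_cap)
def pvScanA (bin_capacities : List Int) (bins : List (List Int)) (elem : Int)
    (acc : Int × Int) (b : Int) : Int × Int :=
  let remaining_capacity :=
    PySem.List.pyGetD bin_capacities b 0 - ((PySem.List.pyGetD bins b []).sum + elem)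
  if remaining_capacity ≥ 0 ∧ remaining_capacity > acc.2 then (b, remaining_capacity)
  else acc

-- inner scan: for i in range(len(bins_in_use)) searching the worst-fitting bin
def pvInnerA (bin_capacities : List Int) (bins : List (List Int)) (bins_in_use : List Int)
    (elem : Int) : Int × Int :=
  (PySem.List.pyRange 0 (PySem.List.len bins_in_use) 1).foldl
    (fun acc i => pvScanA bin_capacities bins elem acc (PySem.List.pyGetD bins_in_use i 0))
    (-1, -1)

-- one iteration of A's 'for elem in elements' loop
def pvStepA (bin_capacities : List Int)
    (st : Bool × List (List Int) × List Int × List (List Int)) (elem : Int) :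
    Bool × List (List Int) × List Int × List (List Int) :=
  let (is_packing_possible, bins, bins_in_use, bins_packed_after_failure) := st
  let wr := pvInnerA bin_capacities bins bins_in_use elem
  let worst_bin := wr.1
  let worst_remaining_capacity := wr.2
  if worst_bin ≠ -1 then
    let bins' := PySem.List.pySetD bins worst_bin
      (PySem.List.pyGetD bins worst_bin [] ++ [elem])
    let after' :=
      if is_packing_possible then bins_packed_after_failure
      else PySem.List.pySetD bins_packed_after_failure worst_bin
        (PySem.List.pyGetD bins_packed_after_failure worst_bin [] ++ [elem])
    let bins_in_use' :=
      if worst_remaining_capacity = 0 then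
        (PySem.List.remove? bins_in_use worst_bin).getD bins_in_use
      else bins_in_use
    (is_packing_possible, bins', bins_in_use', after')
  else
    (false, bins, bins_in_use, bins_packed_after_failure)

def bin_packing_worst_fit_var_capa (bin_capacities : List Int) (elements : List Int) :
    Bool × List (List Int) × List (List Int) :=
  -- max(bin_capacities) is computed (raising on []) and never used: Pre_ excludes []
  let _max_capacity := PySem.List.max? bin_capacities (fun x => x)
  let m := bin_capacities.length
  let st := elements.foldl (pvStepA bin_capacities)
    (true, List.replicate m [], PySem.List.pyRange 0 (m : Int) 1, List.replicate m [])
  (st.1, st.2.1, st.2.2.2)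

-- ===== PORT B =====
-- _insort: insert (free, idx) keeping the list ordered by free desc, idx asc
def pvInsortB (item : Int × Int) : List (Int × Int) → List (Int × Int)
  | [] => [item]
  | p :: t =>
    if p.1 > item.1 ∨ (p.1 = item.1 ∧ p.2 < item.2) then p :: pvInsortB item t
    else item :: p :: t

-- one iteration of B's 'for elem in elements' loop
def pvStepB (st : Bool × List (List Int) × List (List Int) × List (Int × Int)) (elem : Int) :
    Bool × List (List Int) × List (List Int) × List (Int × Int) :=
  let (is_packing_possible, bins, after, open_bins) := st
  match open_bins with
  | [] => (false, bins, after, open_bins)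
  | (free, idx) :: rest =>
    if free < elem then (false, bins, after, open_bins)
    else
      let bins' := PySem.List.pySetD bins idx (PySem.List.pyGetD bins idx [] ++ [elem])
      let after' :=
        if is_packing_possible then after
        else PySem.List.pySetD after idx (PySem.List.pyGetD after idx [] ++ [elem])
      let rem := free - elem
      let open' := if rem > 0 then pvInsortB (rem, idx) rest else rest
      (is_packing_possible, bins', after', open')

def bin_packing_worst_fit_var_capa_alt (bin_capacities : List Int) (elements : List Int) :
    Bool × List (List Int) × List (List Int) :=
  let m := bin_capacities.length
  let open0 := (PySem.List.enumerate bin_capacities 0).foldl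
    (fun s p => pvInsortB (p.2, p.1) s) []
  let st := elements.foldl pvStepB
    (true, List.replicate m [], List.replicate m [], open0)
  (st.1, st.2.1, st.2.2.1)

-- ===== PRECONDITION & SPEC =====
-- Pre_ excludes only the empty capacity list, on which A's max(bin_capacities) raises ValueError.
def Pre_bin_packing_worst_fit_var_capa (bin_capacities : List Int) (_elements : List Int) : Prop :=
  bin_capacities ≠ []
instance (bin_capacities : List Int) (elements : List Int) : Decidable (Pre_bin_packing_worst_fit_var_capa bin_capacities elements) := by unfold Pre_bin_packing_worst_fit_var_capa; infer_instance
def pvWitness_bin_packing_worst_fit_var_capa : List Int × List Int := ([5, 3], [2, 4, 1])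

def Spec_bin_packing_worst_fit_var_capa (bin_capacities : List Int) (elements : List Int) (out : Bool × List (List Int) × List (List Int)) : Prop := out = bin_packing_worst_fit_var_capa_alt bin_capacities elements
instance (bin_capacities : List Int) (elements : List Int) (out : Bool × List (List Int) × List (List Int)) : Decidable (Spec_bin_packing_worst_fit_var_capa bin_capacities elements out) := by unfold Spec_bin_packing_worst_fit_var_capa; infer_instance

-- ===== CLAIM (what is proved, stated in full; the proofs are below) =====
def Claim_equal_bin_packing_worst_fit_var_capa : Prop := ∀ (bin_capacities : List Int) (elements : List Int), Dom_bin_packing_worst_fit_var_capa bin_capacities elements → Pre_bin_packing_worst_fit_var_capa bin_capacities elements → Spec_bin_packing_worst_fit_var_capa bin_capacities elements (bin_packing_worst_fit_var_capa bin_capacities elements)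

-- ===== LEMMAS AND PROOFS =====

-- the strict order B's list is sorted by: free space descending, index ascending
def pvGtK (p q : Int × Int) : Prop := p.1 > q.1 ∨ (p.1 = q.1 ∧ p.2 < q.2)

-- (free space, index) of bin i in A's state
def pvKey (bin_capacities : List Int) (bins : List (List Int)) (i : Int) : Int × Int :=
  (PySem.List.pyGetD bin_capacities i 0 - (PySem.List.pyGetD bins i []).sum, i)

-- the invariant tying B's open list to A's bins_in_use
def pvInv (bin_capacities : List Int) (bins : List (List Int)) (bins_in_use : List Int)
    (opn : List (Int × Int)) : Prop :=
  opn.Perm (bins_in_use.map (pvKey bin_capacities bins)) ∧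
  opn.Pairwise pvGtK ∧
  bins_in_use.Pairwise (· < ·) ∧
  (∀ i ∈ bins_in_use, 0 ≤ i ∧ i < (bin_capacities.length : Int)) ∧
  bins.length = bin_capacities.length

lemma pv_insort_perm (item : Int × Int) (l : List (Int × Int)) :
    (pvInsortB item l).Perm (item :: l) := by
  induction l with
  | nil => simp [pvInsortB]
  | cons p t ih =>
    simp only [pvInsortB]
    split_ifs
    · exact (ih.cons p).trans (List.Perm.swap _ _ _)
    · exact List.Perm.refl _

lemma pv_mem_insort {x item : Int × Int} {l : List (Int × Int)} :
    x ∈ pvInsortB item l ↔ x = item ∨ x ∈ l := by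
  rw [(pv_insort_perm item l).mem_iff]; simp

lemma pv_gtK_trans {p q r : Int × Int} (h1 : pvGtK p q) (h2 : pvGtK q r) : pvGtK p r := by
  unfold pvGtK at *; omega

lemma pv_insort_pairwise (item : Int × Int) (l : List (Int × Int))
    (hpw : l.Pairwise pvGtK) (hfresh : ∀ p ∈ l, p.2 ≠ item.2) :
    (pvInsortB item l).Pairwise pvGtK := by
  induction l with
  | nil => simp [pvInsortB]
  | cons p t ih =>
    rw [List.pairwise_cons] at hpw
    obtain ⟨hp, hpwt⟩ := hpw
    simp only [pvInsortB]
    split_ifs with hc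
    · rw [List.pairwise_cons]
      refine ⟨?_, ih hpwt (fun q hq => hfresh q (List.mem_cons_of_mem _ hq))⟩
      intro q hq
      rcases pv_mem_insort.mp hq with rfl | hq
      · exact hc
      · exact hp q hq
    · have hne : p.2 ≠ item.2 := hfresh p List.mem_cons_self
      have hip : pvGtK item p := by unfold pvGtK at *; omega
      rw [List.pairwise_cons]
      refine ⟨?_, List.pairwise_cons.mpr ⟨hp, hpwt⟩⟩
      intro q hq
      rcases List.mem_cons.mp hq with rfl | hq
      · exact hip
      · exact pv_gtK_trans hip (hp q hq)

-- S1: no candidate beats the accumulator ⇒ the scan is the identity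
lemma pv_scanA_const (cap : List Int) (bins : List (List Int)) (elem : Int) :
    ∀ (l : List Int) (a : Int × Int),
      (∀ i ∈ l, PySem.List.pyGetD cap i 0 - ((PySem.List.pyGetD bins i []).sum + elem) ≤ a.2) →
      l.foldl (pvScanA cap bins elem) a = a := by
  intro l
  induction l with
  | nil => intro a _; simp
  | cons x t ih =>
    intro a h
    have hx := h x List.mem_cons_self
    simp only [List.foldl_cons, pvScanA]
    rw [if_neg (by omega)]
    exact ih a (fun i hi => h i (List.mem_cons_of_mem _ hi))

-- S2: all candidates below R keep the accumulator's value below R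
lemma pv_scanA_lt (cap : List Int) (bins : List (List Int)) (elem : Int) (R : Int) :
    ∀ (l : List Int) (a : Int × Int), a.2 < R →
      (∀ i ∈ l, PySem.List.pyGetD cap i 0 - ((PySem.List.pyGetD bins i []).sum + elem) < R) →
      (l.foldl (pvScanA cap bins elem) a).2 < R := by
  intro l
  induction l with
  | nil => intro a ha _; simpa using ha
  | cons x t ih =>
    intro a ha h
    have hx := h x List.mem_cons_self
    simp only [List.foldl_cons, pvScanA]
    split_ifs
    · exact ih _ (by simpa using hx) (fun i hi => h i (List.mem_cons_of_mem _ hi))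
    · exact ih _ ha (fun i hi => h i (List.mem_cons_of_mem _ hi))

lemma pv_nodup_in_use {in_use : List Int} (h : in_use.Pairwise (· < ·)) : in_use.Nodup :=
  h.imp (fun hlt => Int.ne_of_lt hlt)

-- head of B's sorted open list = result of A's inner scan
lemma pv_inner_head (cap : List Int) (bins : List (List Int)) (elem : Int)
    (in_use : List Int) (f b : Int) (rest : List (Int × Int))
    (hperm : ((f, b) :: rest).Perm (in_use.map (pvKey cap bins)))
    (hpw : ((f, b) :: rest).Pairwise pvGtK)
    (hinc : in_use.Pairwise (· < ·)) :
    pvInnerA cap bins in_use elem =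
      if elem ≤ f then (b, f - elem) else (-1, -1) := by
  have hfold : pvInnerA cap bins in_use elem
      = in_use.foldl (pvScanA cap bins elem) (-1, -1) := by
    unfold pvInnerA
    exact PySem.List.foldl_pyRange_zero_pyGetD in_use 0 (pvScanA cap bins elem) (-1, -1)
  -- every bin of in_use has its key in the head/rest list
  have hmemL : ∀ i ∈ in_use, pvKey cap bins i = (f, b) ∨ pvGtK (f, b) (pvKey cap bins i) := by
    intro i hi
    have : pvKey cap bins i ∈ (f, b) :: rest :=
      hperm.mem_iff.mpr (List.mem_map_of_mem hi)
    rcases List.mem_cons.mp this with h | h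
    · exact Or.inl h
    · exact Or.inr ((List.pairwise_cons.mp hpw).1 _ h)
  have hfree_le : ∀ i ∈ in_use,
      PySem.List.pyGetD cap i 0 - (PySem.List.pyGetD bins i []).sum ≤ f := by
    intro i hi
    rcases hmemL i hi with h | h
    · have := congrArg Prod.fst h; simpa [pvKey] using this.le
    · simp [pvGtK, pvKey] at h; omega
  -- b is a member with free space exactly f
  have hb : b ∈ in_use ∧ PySem.List.pyGetD cap b 0 - (PySem.List.pyGetD bins b []).sum = f := by
    have : (f, b) ∈ in_use.map (pvKey cap bins) := hperm.mem_iff.mp List.mem_cons_self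
    obtain ⟨i, hi, hkey⟩ := List.mem_map.mp this
    have hib : i = b := congrArg Prod.snd hkey
    subst hib
    exact ⟨hi, congrArg Prod.fst hkey⟩
  by_cases hfit : elem ≤ f
  · rw [hfold, if_pos hfit]
    obtain ⟨u1, u2, hsplit⟩ := List.append_of_mem hb.1
    have hfb := hb.2
    rw [hsplit] at hinc ⊢
    have hsplitpw := List.pairwise_append.mp hinc
    have hlt_b : ∀ i ∈ u1, i < b := fun i hi => hsplitpw.2.2 i hi b List.mem_cons_self
    -- free space before b is strictly below f
    have hstrict : ∀ i ∈ u1,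
        PySem.List.pyGetD cap i 0 - (PySem.List.pyGetD bins i []).sum < f := by
      intro i hi
      have him : i ∈ in_use := hsplit.symm ▸ List.mem_append_left _ hi
      have hib := hlt_b i hi
      rcases hmemL i him with h | h
      · have : i = b := congrArg Prod.snd h
        omega
      · simp [pvGtK, pvKey] at h; omega
    rw [List.foldl_append, List.foldl_cons]
    have h1 : (u1.foldl (pvScanA cap bins elem) (-1, -1)).2 < f - elem := by
      refine pv_scanA_lt cap bins elem (f - elem) u1 (-1, -1) (by simp; omega) ?_
      intro i hi; have := hstrict i hi; omega
    have hstep : pvScanA cap bins elem (u1.foldl (pvScanA cap bins elem) (-1, -1)) b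
        = (b, f - elem) := by
      simp only [pvScanA]
      rw [if_pos ⟨by omega, by omega⟩]
      congr 1; omega
    rw [hstep]
    refine pv_scanA_const cap bins elem u2 (b, f - elem) ?_
    intro i hi
    have := hfree_le i (hsplit.symm ▸ List.mem_append_right _ (List.mem_cons_of_mem _ hi))
    simp only; omega
  · rw [hfold, if_neg hfit]
    refine pv_scanA_const cap bins elem in_use (-1, -1) ?_
    intro i hi
    have := hfree_le i hi
    simp only; omega

lemma pv_getD_pySetD (bins : List (List Int)) (b i : Int) (v : List Int)
    (hb0 : 0 ≤ b) (hblt : b < (bins.length : Int)) (hi0 : 0 ≤ i) (hilt : i < (bins.length : Int)) :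
    PySem.List.pyGetD (PySem.List.pySetD bins b v) i []
      = if i = b then v else PySem.List.pyGetD bins i [] := by
  rw [PySem.List.pySetD_of_nonneg bins v hb0,
    PySem.List.pyGetD_eq_getElem _ _ hi0 (by simp; omega),
    List.getElem_set]
  by_cases hib : i = b
  · simp [hib]
  · rw [if_neg hib, if_neg (by omega), PySem.List.pyGetD_eq_getElem _ _ hi0 hilt]

lemma pv_key_set_ne (cap : List Int) (bins : List (List Int)) (b i : Int) (v : List Int)
    (hb0 : 0 ≤ b) (hblt : b < (bins.length : Int)) (hi0 : 0 ≤ i) (hilt : i < (bins.length : Int))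
    (hne : i ≠ b) :
    pvKey cap (PySem.List.pySetD bins b v) i = pvKey cap bins i := by
  simp [pvKey, pv_getD_pySetD bins b i v hb0 hblt hi0 hilt, hne]

def pvStRel (cap : List Int) (sA : Bool × List (List Int) × List Int × List (List Int))
    (sB : Bool × List (List Int) × List (List Int) × List (Int × Int)) : Prop :=
  sA.1 = sB.1 ∧ sA.2.1 = sB.2.1 ∧ sA.2.2.2 = sB.2.2.1 ∧ pvInv cap sA.2.1 sA.2.2.1 sB.2.2.2

lemma pv_step_rel (cap : List Int) (sA : Bool × List (List Int) × List Int × List (List Int))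
    (sB : Bool × List (List Int) × List (List Int) × List (Int × Int)) (elem : Int)
    (h : pvStRel cap sA sB) :
    pvStRel cap (pvStepA cap sA elem) (pvStepB sB elem) := by
  obtain ⟨p, bins, in_use, after⟩ := sA
  obtain ⟨p2, bins2, after2, opn⟩ := sB
  obtain ⟨hp, hbins, hafter, hperm, hopw, hinc, hbnd, hlen⟩ := h
  simp only at hp hbins hafter hperm hopw hinc hbnd hlen
  subst hp; subst hbins; subst hafter
  match opn with
  | [] =>
    have hmap : in_use.map (pvKey cap bins) = [] := (List.Perm.nil_eq hperm).symm
    have hiu : in_use = [] := List.map_eq_nil_iff.mp hmap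
    subst hiu
    have hinner : pvInnerA cap bins [] elem = (-1, -1) := by
      simp [pvInnerA, PySem.List.len]
    simp only [pvStepA, pvStepB, hinner]
    exact ⟨rfl, rfl, rfl, hperm, hopw, hinc, hbnd, hlen⟩
  | (f, b) :: rest =>
    have hinner := pv_inner_head cap bins elem in_use f b rest hperm hopw hinc
    have hbkey : (f, b) ∈ in_use.map (pvKey cap bins) := hperm.mem_iff.mp List.mem_cons_self
    obtain ⟨i0, hi0mem, hi0key⟩ := List.mem_map.mp hbkey
    have hi0b : i0 = b := congrArg Prod.snd hi0key
    rw [hi0b] at hi0mem hi0key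
    have hbmem : b ∈ in_use := hi0mem
    have hfb : PySem.List.pyGetD cap b 0 - (PySem.List.pyGetD bins b []).sum = f :=
      congrArg Prod.fst hi0key
    obtain ⟨hb0, hblt⟩ := hbnd b hbmem
    have hnd : in_use.Nodup := pv_nodup_in_use hinc
    -- indices occurring in rest differ from b
    have hsndnd : (((f, b) :: rest).map Prod.snd).Nodup := by
      have hpm : (((f, b) :: rest).map Prod.snd).Perm in_use := by
        have := hperm.map Prod.snd
        rwa [List.map_map, show (Prod.snd ∘ pvKey cap bins) = id from rfl, List.map_id] at this
      exact hpm.nodup_iff.mpr hnd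
    have hrest_ne : ∀ q ∈ rest, q.2 ≠ b := by
      intro q hq
      have hx := List.pairwise_cons.mp hsndnd
      exact fun hqb => (hx.1 q.2 (List.mem_map_of_mem hq)) hqb.symm
    by_cases hfit : elem ≤ f
    · rw [if_pos hfit] at hinner
      have hbne : b ≠ -1 := by omega
      have hbltb : b < (bins.length : Int) := by omega
      simp only [pvStepA, pvStepB, hinner, hbne, ne_eq, not_false_eq_true, if_true,
        if_neg (by omega : ¬ f < elem)]
      set bins' := PySem.List.pySetD bins b (PySem.List.pyGetD bins b [] ++ [elem]) with hbins'
      have hkey_ne : ∀ i ∈ in_use, i ≠ b → pvKey cap bins' i = pvKey cap bins i := by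
        intro i hi hne
        obtain ⟨hi0, hilt⟩ := hbnd i hi
        exact pv_key_set_ne cap bins b i _ hb0 hbltb hi0 (by omega) hne
      have hkey_b : pvKey cap bins' b = (f - elem, b) := by
        simp only [pvKey, hbins', pv_getD_pySetD bins b b _ hb0 hbltb hb0 hbltb]
        simp [List.sum_append]
        omega
      -- split in_use at b
      obtain ⟨u1, u2, hsplit⟩ := List.append_of_mem hbmem
      have hbu1 : b ∉ u1 := by
        intro hmem
        rw [hsplit] at hnd
        exact (List.disjoint_of_nodup_append hnd hmem) List.mem_cons_self
      have hbu2 : b ∉ u2 := by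
        have := hnd
        rw [hsplit, List.nodup_append] at this
        have := this.2.1
        rw [List.nodup_cons] at this
        exact this.1
      have hmapker : ∀ (u : List Int), (∀ i ∈ u, i ∈ in_use) → b ∉ u →
          u.map (pvKey cap bins') = u.map (pvKey cap bins) := by
        intro u hsub hnb
        exact List.map_congr_left (fun i hi => hkey_ne i (hsub i hi)
          (fun hib => hnb (hib ▸ hi)))
      have hu1sub : ∀ i ∈ u1, i ∈ in_use := fun i hi => hsplit.symm ▸ List.mem_append_left _ hi
      have hu2sub : ∀ i ∈ u2, i ∈ in_use :=
        fun i hi => hsplit.symm ▸ List.mem_append_right _ (List.mem_cons_of_mem _ hi)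
      -- cancel the shared head: (u1 ++ u2).map pvKey ~ rest
      have hcui : (u1.map (pvKey cap bins) ++ u2.map (pvKey cap bins)).Perm rest := by
        have hmap0 : in_use.map (pvKey cap bins)
            = u1.map (pvKey cap bins) ++ (f, b) :: u2.map (pvKey cap bins) := by
          have hkb : pvKey cap bins b = (f, b) := by simp [pvKey, hfb]
          rw [hsplit, List.map_append, List.map_cons, hkb]
        have h1 : ((f, b) :: (u1.map (pvKey cap bins) ++ u2.map (pvKey cap bins))).Perm
            ((f, b) :: rest) := by
          refine List.Perm.trans ?_ hperm.symm
          rw [hmap0]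
          exact List.perm_middle.symm
        exact h1.cons_inv
      refine ⟨rfl, rfl, rfl, ?_, ?_, ?_, ?_, ?_⟩
      · -- perm component
        dsimp only
        by_cases hr0 : f - elem = 0
        · rw [if_neg (by omega : ¬ f - elem > 0), if_pos hr0,
            PySem.List.remove?_eq_some_erase in_use b hbmem, Option.getD_some, hsplit,
            List.erase_append_right _ hbu1, List.erase_cons_head, List.map_append,
            hmapker u1 hu1sub hbu1, hmapker u2 hu2sub hbu2]
          exact hcui.symm
        · rw [if_pos (by omega : f - elem > 0), if_neg hr0, hsplit, List.map_append,
            List.map_cons, hkey_b, hmapker u1 hu1sub hbu1, hmapker u2 hu2sub hbu2]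
          refine (pv_insort_perm (f - elem, b) rest).trans ?_
          exact ((hcui.symm).cons _).trans List.perm_middle.symm
      · -- pairwise component
        dsimp only
        by_cases hr0 : f - elem > 0
        · rw [if_pos hr0]
          exact pv_insort_pairwise _ rest (List.pairwise_cons.mp hopw).2
            (fun q hq => hrest_ne q hq)
        · rw [if_neg hr0]
          exact (List.pairwise_cons.mp hopw).2
      · -- in_use sortedness
        dsimp only
        by_cases hr0 : f - elem = 0
        · rw [if_pos hr0, PySem.List.remove?_eq_some_erase in_use b hbmem, Option.getD_some]
          exact hinc.sublist (List.erase_sublist)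
        · rw [if_neg hr0]; exact hinc
      · -- bounds
        dsimp only
        by_cases hr0 : f - elem = 0
        · rw [if_pos hr0, PySem.List.remove?_eq_some_erase in_use b hbmem, Option.getD_some]
          exact fun i hi => hbnd i (List.mem_of_mem_erase hi)
        · rw [if_neg hr0]; exact hbnd
      · -- lengths
        dsimp only
        simp [hbins', PySem.List.pySetD_of_nonneg bins _ hb0, hlen]
    · rw [if_neg hfit] at hinner
      have hA : pvStepA cap (p, bins, in_use, after) elem = (false, bins, in_use, after) := by
        simp [pvStepA, hinner]
      have hB : pvStepB (p, bins, after, (f, b) :: rest) elem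
          = (false, bins, after, (f, b) :: rest) := by
        simp [pvStepB, show f < elem by omega]
      rw [hA, hB]
      exact ⟨rfl, rfl, rfl, hperm, hopw, hinc, hbnd, hlen⟩

lemma pv_loop_rel (cap : List Int) :
    ∀ (els : List Int) sA sB, pvStRel cap sA sB →
    pvStRel cap (els.foldl (pvStepA cap) sA) (els.foldl pvStepB sB) := by
  intro els
  induction els with
  | nil => intro sA sB h; simpa using h
  | cons e t ih =>
    intro sA sB h
    simp only [List.foldl_cons]
    exact ih _ _ (pv_step_rel cap sA sB e h)

-- building B's initial list by repeated insertion: permutation + sortedness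
lemma pv_build (l : List (Int × Int)) :
    ∀ (acc : List (Int × Int)), acc.Pairwise pvGtK →
      (l.map Prod.fst).Nodup → (∀ p ∈ l, ∀ q ∈ acc, q.2 ≠ p.1) →
      (l.foldl (fun s p => pvInsortB (p.2, p.1) s) acc).Perm
        (l.map (fun p => (p.2, p.1)) ++ acc) ∧
      (l.foldl (fun s p => pvInsortB (p.2, p.1) s) acc).Pairwise pvGtK := by
  induction l with
  | nil => intro acc hpw _ _; simpa using hpw
  | cons p t ih =>
    intro acc hpw hnd hfresh
    have hnd2 : p.1 ∉ t.map Prod.fst ∧ (t.map Prod.fst).Nodup := by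
      rw [List.map_cons, List.nodup_cons] at hnd
      exact ⟨hnd.1, hnd.2⟩
    simp only [List.foldl_cons]
    have hpw' : (pvInsortB (p.2, p.1) acc).Pairwise pvGtK :=
      pv_insort_pairwise _ acc hpw (fun q hq => hfresh p List.mem_cons_self q hq)
    have hfresh' : ∀ p' ∈ t, ∀ q ∈ pvInsortB (p.2, p.1) acc, q.2 ≠ p'.1 := by
      intro p' hp' q hq
      rcases pv_mem_insort.mp hq with rfl | hq
      · intro hc
        have hc' : p'.1 = p.1 := hc.symm
        exact hnd2.1 (hc' ▸ List.mem_map_of_mem hp')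
      · exact hfresh p' (List.mem_cons_of_mem _ hp') q hq
    obtain ⟨hpermr, hpwres⟩ := ih (pvInsortB (p.2, p.1) acc) hpw' hnd2.2 hfresh'
    refine ⟨?_, hpwres⟩
    refine hpermr.trans ?_
    refine List.Perm.trans (List.Perm.append_left _ (pv_insort_perm _ _)) ?_
    simp only [List.map_cons]
    exact List.perm_middle

lemma pv_init_inv (cap : List Int) :
    pvInv cap (List.replicate cap.length []) (PySem.List.pyRange 0 (cap.length : Int) 1)
      ((PySem.List.enumerate cap 0).foldl (fun s p => pvInsortB (p.2, p.1) s) []) := by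
  have hen : PySem.List.enumerate cap 0
      = (PySem.List.pyRange 0 (cap.length : Int) 1).map
          (fun j => (j, PySem.List.pyGetD cap j 0)) := by
    have := PySem.List.enumerate_eq_map_pyRange (xs := cap) (d := 0)
    simpa [PySem.List.len] using this
  have hbuild := pv_build (PySem.List.enumerate cap 0) [] (by simp)
    (by
      have hmf : (PySem.List.enumerate cap 0).map Prod.fst
          = PySem.List.pyRange 0 (0 + (cap.length : Int)) 1 := by
        simpa using PySem.List.map_fst_enumerate cap 0
      rw [hmf]
      simpa using PySem.List.nodup_pyRange_one 0 (cap.length : Int))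
    (by simp)
  have hmapeq : (PySem.List.enumerate cap 0).map (fun p => (p.2, p.1))
      = (PySem.List.pyRange 0 (cap.length : Int) 1).map
          (pvKey cap (List.replicate cap.length [])) := by
    rw [hen, List.map_map]
    refine List.map_congr_left ?_
    intro j hj
    rw [PySem.List.mem_pyRange_one] at hj
    simp only [Function.comp_apply, pvKey]
    rw [PySem.List.pyGetD_eq_getElem (List.replicate cap.length ([] : List Int)) _ hj.1
      (by simp; omega)]
    simp
  refine ⟨?_, hbuild.2, PySem.List.pairwise_lt_pyRange_one 0 _, ?_, by simp⟩
  · have hx := hbuild.1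
    rw [List.append_nil, hmapeq] at hx
    exact hx
  · intro i hi; rw [PySem.List.mem_pyRange_one] at hi; omega

-- ===== VERDICT (by name: the statement is the Claim_ definition above) =====
theorem bin_packing_worst_fit_var_capa_spec : Claim_equal_bin_packing_worst_fit_var_capa := by
  intro cap els _ _
  unfold Spec_bin_packing_worst_fit_var_capa
  unfold bin_packing_worst_fit_var_capa bin_packing_worst_fit_var_capa_alt
  have h := pv_loop_rel cap els
    (true, List.replicate cap.length [], PySem.List.pyRange 0 (cap.length : Int) 1,
      List.replicate cap.length [])
    (true, List.replicate cap.length [], List.replicate cap.length [],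
      (PySem.List.enumerate cap 0).foldl (fun s p => pvInsortB (p.2, p.1) s) [])
    ⟨rfl, rfl, rfl, pv_init_inv cap⟩
  obtain ⟨h1, h2, h3, _⟩ := h
  simp only [Prod.ext_iff]
  exact ⟨h1, h2, h3⟩
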